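-- pv_equiv track=rewrite | github.com/ksu-hmi/DriveGuard360 | drowsiness_check.py | check_drowsiness
-- ===== SOURCE A (Python) =====
-- def check_drowsiness(blinks):
--     count = 0
--     for state in blinks:
--         if state == "closed":
--             count += 1
--             if count >= 3:
--                 return True
--         else:
--             count = 0
--     return False
-- ===== SOURCE B (Python) =====
-- def check_drowsiness(blinks):
--     # slide a window of three consecutive states over the list
--     for a, b, c in zip(blinks, blinks[1:], blinks[2:]):
--         if a == b == c == "closed":
--             return True
--     return False
-- ===== Notes on version B (the rewrite author's own statement) =====
-- stated objective: idiomatic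
-- what changed: Replaces the running counter with a zip-based sliding window of three consecutive states, returning True if any window is all 'closed'.
import Mathlib
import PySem

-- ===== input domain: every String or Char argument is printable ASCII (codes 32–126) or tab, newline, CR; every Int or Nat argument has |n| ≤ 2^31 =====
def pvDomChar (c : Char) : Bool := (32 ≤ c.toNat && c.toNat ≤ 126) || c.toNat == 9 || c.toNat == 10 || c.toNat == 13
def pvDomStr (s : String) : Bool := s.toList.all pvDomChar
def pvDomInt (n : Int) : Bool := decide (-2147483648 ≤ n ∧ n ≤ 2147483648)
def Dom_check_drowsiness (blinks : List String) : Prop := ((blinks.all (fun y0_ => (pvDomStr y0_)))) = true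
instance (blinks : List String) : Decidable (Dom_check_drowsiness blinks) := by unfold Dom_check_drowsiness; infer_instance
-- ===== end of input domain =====

-- B replaces A's running counter with a zip-based sliding window of three consecutive states (idiomatic decomposition).


-- ===== PORT A =====
-- A's loop with its early return and the running counter, as structural recursion over the list
def pvLoopA : Int → List String → Bool
  | _, [] => false
  | count, state :: rest =>
    if state == "closed" then
      if count + 1 ≥ 3 then true else pvLoopA (count + 1) rest
    else pvLoopA 0 rest

def check_drowsiness (blinks : List String) : Bool := pvLoopA 0 blinks

-- ===== PORT B =====
-- Source B: for a, b, c in zip(blinks, blinks[1:], blinks[2:]): if a == b == c == "closed": return True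
def check_drowsiness_alt (blinks : List String) : Bool :=
  ((blinks.zip (blinks.drop 1)).zip (blinks.drop 2)).any
    (fun p => p.1.1 == p.1.2 && p.1.2 == p.2 && p.2 == "closed")

-- ===== PRECONDITION & SPEC =====
def Spec_check_drowsiness (blinks : List String) (out : Bool) : Prop := out = check_drowsiness_alt blinks
instance (blinks : List String) (out : Bool) : Decidable (Spec_check_drowsiness blinks out) := by unfold Spec_check_drowsiness; infer_instance

-- ===== CLAIM (what is proved, stated in full; the proofs are below) =====
def Claim_equal_check_drowsiness : Prop := ∀ (blinks : List String), Dom_check_drowsiness blinks → Spec_check_drowsiness blinks (check_drowsiness blinks)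

-- ===== LEMMAS AND PROOFS =====

-- reference form: any window of three consecutive closed states, by structural recursion
def pvTriple : List String → Bool
  | a :: b :: c :: rest =>
    (a == "closed" && b == "closed" && c == "closed") || pvTriple (b :: c :: rest)
  | _ => false

-- first element closed / first two elements closed
def pvH1 : List String → Bool
  | a :: _ => a == "closed"
  | [] => false

def pvH2 : List String → Bool
  | a :: b :: _ => a == "closed" && b == "closed"
  | _ => false

theorem pvH2_le_pvH1 (l : List String) : pvH2 l = true → pvH1 l = true := by
  cases l with
  | nil => simp [pvH2]
  | cons a t =>
    cases t with
    | nil => simp [pvH2]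
    | cons b t' => simp [pvH2, pvH1]; intro h _; exact h

theorem pvTriple_cons (a : String) (l : List String) :
    pvTriple (a :: l) = ((a == "closed" && pvH2 l) || pvTriple l) := by
  cases l with
  | nil => simp [pvTriple, pvH2]
  | cons b t =>
    cases t with
    | nil => simp [pvTriple, pvH2]
    | cons c t' => simp [pvTriple, pvH2, Bool.and_assoc]

theorem pvH1_cons (a : String) (t : List String) : pvH1 (a :: t) = (a == "closed") := by
  simp [pvH1]

theorem pvH2_cons (a : String) (t : List String) : pvH2 (a :: t) = (a == "closed" && pvH1 t) := by
  cases t <;> simp [pvH2, pvH1]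

theorem pvLoopA_eq (l : List String) :
    pvLoopA 0 l = pvTriple l ∧
    pvLoopA 1 l = (pvH2 l || pvTriple l) ∧
    pvLoopA 2 l = (pvH1 l || pvTriple l) := by
  induction l with
  | nil => simp [pvLoopA, pvTriple, pvH1, pvH2]
  | cons a t ih =>
    obtain ⟨ih0, ih1, ih2⟩ := ih
    by_cases ha : a = "closed"
    · subst ha
      refine ⟨?_, ?_, ?_⟩
      · rw [show pvLoopA 0 ("closed" :: t) = pvLoopA 1 t from by simp [pvLoopA],
            ih1, pvTriple_cons]
        simp
      · rw [show pvLoopA 1 ("closed" :: t) = pvLoopA 2 t from by simp [pvLoopA],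
            ih2, pvTriple_cons, pvH2_cons]
        cases h2 : pvH2 t
        · simp
        · have h1 := pvH2_le_pvH1 t h2
          simp [h1]
      · rw [show pvLoopA 2 ("closed" :: t) = true from by simp [pvLoopA],
            pvH1_cons]
        simp
    · have ha' : (a == "closed") = false := by simp [ha]
      have hl : ∀ c : Int, pvLoopA c (a :: t) = pvLoopA 0 t := by
        intro c; simp [pvLoopA, ha]
      refine ⟨?_, ?_, ?_⟩ <;>
        rw [hl, ih0, pvTriple_cons] <;>
        simp [pvH1_cons, pvH2_cons, ha']

theorem chain_eq (a b c : String) :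
    (a == b && (b == c && c == "closed")) = (a == "closed" && (b == "closed" && c == "closed")) := by
  rw [Bool.eq_iff_iff]
  simp only [Bool.and_eq_true, beq_iff_eq]
  constructor
  · rintro ⟨h1, h2, h3⟩
    exact ⟨h1.trans (h2.trans h3), h2.trans h3, h3⟩
  · rintro ⟨h1, h2, h3⟩
    exact ⟨h1.trans h2.symm, h2.trans h3.symm, h3⟩

theorem alt_cons (a b c : String) (t : List String) :
    check_drowsiness_alt (a :: b :: c :: t) =
      ((a == b && b == c && c == "closed") || check_drowsiness_alt (b :: c :: t)) := by
  simp [check_drowsiness_alt, Bool.and_assoc]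

theorem alt_eq_triple (l : List String) : check_drowsiness_alt l = pvTriple l := by
  induction l with
  | nil => simp [check_drowsiness_alt, pvTriple]
  | cons a t ih =>
    cases t with
    | nil => simp [check_drowsiness_alt, pvTriple]
    | cons b t' =>
      cases t' with
      | nil => simp [check_drowsiness_alt, pvTriple]
      | cons c t'' =>
        rw [alt_cons, ih]
        simp only [pvTriple, Bool.and_assoc, chain_eq]

-- ===== VERDICT (by name: the statement is the Claim_ definition above) =====
theorem check_drowsiness_spec : Claim_equal_check_drowsiness := by
  intro blinks _
  unfold Spec_check_drowsiness check_drowsiness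
  rw [alt_eq_triple, (pvLoopA_eq blinks).1]
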